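-- pv_equiv track=rewrite | github.com/localwiki/localwiki-backend-server | sapling/infobox/widgets.py | _time_format_for_javascript
-- ===== SOURCE A (Python) =====
-- def _time_format_for_javascript(format):
--     js_format = format
--     format_map = {'%H': 'H',  # hour (24-hour)
--                   '%I': 'h',  # hour (12-hour)
--                   '%M': 'i',  # minutes
--                   '%S': 's',  # seconds
--                   '%p': 'A',  # AM/PM
--                  }
--     for py, js in format_map.items():
--         js_format = js_format.replace(py, js)
--     return js_format
-- ===== SOURCE B (Python) =====
-- # B: single left-to-right cursor scan instead of five sequential str.replace passes.
-- _JS_CODE = {'H': 'H',  # hour (24-hour)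
--             'I': 'h',  # hour (12-hour)
--             'M': 'i',  # minutes
--             'S': 's',  # seconds
--             'p': 'A',  # AM/PM
--            }
--
-- def _time_format_for_javascript(format):
--     out = []
--     i = 0
--     n = len(format)
--     while i < n:
--         if format[i] == '%' and i + 1 < n and format[i + 1] in _JS_CODE:
--             out.append(_JS_CODE[format[i + 1]])
--             i += 2
--         else:
--             out.append(format[i])
--             i += 1
--     return ''.join(out)
-- ===== Notes on version B (the rewrite author's own statement) =====
-- stated objective: faster
-- what changed: Replaced five sequential full-string str.replace passes with one left-to-right cursor scan that maps each '%'+code pair in a single traversal.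
import Mathlib
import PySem

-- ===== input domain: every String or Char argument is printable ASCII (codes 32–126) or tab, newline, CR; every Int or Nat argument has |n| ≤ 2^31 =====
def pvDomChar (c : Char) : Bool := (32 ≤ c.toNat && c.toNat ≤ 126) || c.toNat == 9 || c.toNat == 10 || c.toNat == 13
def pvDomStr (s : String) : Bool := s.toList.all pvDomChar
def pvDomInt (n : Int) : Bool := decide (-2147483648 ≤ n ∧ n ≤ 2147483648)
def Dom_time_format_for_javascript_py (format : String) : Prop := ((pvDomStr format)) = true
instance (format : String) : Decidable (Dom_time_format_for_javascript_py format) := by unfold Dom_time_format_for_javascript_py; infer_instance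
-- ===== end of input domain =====

-- B replaces A's five sequential str.replace passes by one left-to-right cursor scan over the string.


-- ===== PORT A =====
-- A: js_format = format, then one str.replace pass per format code, in dict insertion order.
def time_format_for_javascript_py (format : String) : String :=
  let js0 := format
  let js1 := PySem.Str.replace js0 "%H" "H"
  let js2 := PySem.Str.replace js1 "%I" "h"
  let js3 := PySem.Str.replace js2 "%M" "i"
  let js4 := PySem.Str.replace js3 "%S" "s"
  let js5 := PySem.Str.replace js4 "%p" "A"
  js5

-- ===== PORT B =====
-- Source B's dict _JS_CODE: format-code character ↦ JS character
def jsCode? (c : Char) : Option Char :=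
  PySem.Dict.get? (PySem.Dict.ofList [('H', 'H'), ('I', 'h'), ('M', 'i'), ('S', 's'), ('p', 'A')]) c

-- Source B's while-loop over the cursor i: on '%' followed by a known code emit the mapped
-- character and advance 2, otherwise emit the current character and advance 1.
def scanB : List Char → List Char
  | [] => []
  | [a] => [a]
  | a :: b :: t =>
    if a = '%' then
      match jsCode? b with
      | some j => j :: scanB t
      | none => a :: scanB (b :: t)
    else a :: scanB (b :: t)

def time_format_for_javascript_py_alt (format : String) : String :=
  String.ofList (scanB format.toList)

-- ===== PRECONDITION & SPEC =====
def Spec_time_format_for_javascript_py (format : String) (out : String) : Prop := out = time_format_for_javascript_py_alt format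
instance (format : String) (out : String) : Decidable (Spec_time_format_for_javascript_py format out) := by unfold Spec_time_format_for_javascript_py; infer_instance

-- ===== CLAIM (what is proved, stated in full; the proofs are below) =====
def Claim_equal_time_format_for_javascript_py : Prop := ∀ (format : String), Dom_time_format_for_javascript_py format → Spec_time_format_for_javascript_py format (time_format_for_javascript_py format)

-- ===== LEMMAS AND PROOFS =====

-- one replace pass with pattern ['%', x] and replacement [y], written structurally
def rep1 (x y : Char) : List Char → List Char
  | [] => []
  | [a] => [a]
  | a :: b :: t => if a = '%' ∧ b = x then y :: rep1 x y t else a :: rep1 x y (b :: t)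

theorem go_eq_rep1 (x y : Char) :
    ∀ (fuel : Nat) (l acc : List Char), l.length ≤ fuel →
      PySem.Chars.replace.go ['%', x] [y] fuel l acc = acc.reverse ++ rep1 x y l := by
  intro fuel
  induction fuel with
  | zero =>
    intro l acc h
    have hl : l = [] := List.eq_nil_of_length_eq_zero (Nat.le_zero.mp h)
    subst hl
    simp [PySem.Chars.replace.go, rep1]
  | succ n ih =>
    intro l acc h
    match l with
    | [] => simp [PySem.Chars.replace.go, rep1]
    | [c] =>
      have hpre : List.isPrefixOf ['%', x] [c] = false := by
        simp [List.isPrefixOf]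
      simp only [PySem.Chars.replace.go, hpre, Bool.false_eq_true, if_false]
      rw [ih [] (c :: acc) (by simp)]
      simp [rep1]
    | c :: b :: t =>
      by_cases hm : c = '%' ∧ b = x
      · obtain ⟨hc, hb⟩ := hm
        subst hc; subst hb
        have hpre : List.isPrefixOf ['%', b] ('%' :: b :: t) = true := by
          simp [List.isPrefixOf]
        simp only [PySem.Chars.replace.go, hpre, if_true]
        have hlen : t.length ≤ n := by simp at h; omega
        rw [show List.drop (['%', b] : List Char).length ('%' :: b :: t) = t by simp]
        rw [ih t ([y].reverse ++ acc) hlen]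
        simp [rep1]
      · have hpre : List.isPrefixOf ['%', x] (c :: b :: t) = false := by
          by_cases h1 : c = '%'
          · subst h1
            have h2 : ¬ b = x := fun hbx => hm ⟨rfl, hbx⟩
            simp [List.isPrefixOf]
            exact fun hxb => h2 hxb.symm
          · have e : (('%' : Char) == c) = false := by
              rw [beq_eq_false_iff_ne]; exact fun hc => h1 hc.symm
            simp [List.isPrefixOf, e]
        simp only [PySem.Chars.replace.go, hpre, Bool.false_eq_true, if_false]
        have hlen : (b :: t).length ≤ n := by simp at h ⊢; omega
        rw [ih (b :: t) (c :: acc) hlen]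
        simp [rep1, if_neg hm]

theorem replace_eq_rep1 (x y : Char) (l : List Char) :
    PySem.Chars.replace l ['%', x] [y] = rep1 x y l := by
  rw [PySem.Chars.replace]
  rw [if_neg (by simp)]
  rw [go_eq_rep1 x y l.length l [] (le_refl _)]
  simp

theorem rep1_cons_ne (x y a : Char) (l : List Char) (ha : a ≠ '%') :
    rep1 x y (a :: l) = a :: rep1 x y l := by
  match l with
  | [] => simp [rep1]
  | b :: t => simp [rep1, ha]

theorem rep1_pct (x y : Char) (l : List Char) (h : l.head? ≠ some x) :
    rep1 x y ('%' :: l) = '%' :: rep1 x y l := by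
  match l with
  | [] => simp [rep1]
  | b :: t =>
    have hb : b ≠ x := by simpa using h
    simp [rep1, hb]

theorem rep1_match (x y : Char) (t : List Char) :
    rep1 x y ('%' :: x :: t) = y :: rep1 x y t := by
  simp [rep1]

theorem rep1_head (x y : Char) (l : List Char) :
    (rep1 x y l).head? = l.head? ∨ (rep1 x y l).head? = some y := by
  match l with
  | [] => left; rfl
  | [a] => left; rfl
  | a :: b :: t =>
    by_cases hm : a = '%' ∧ b = x
    · right; simp [rep1, hm]
    · left; simp [rep1, hm]

-- the composition of A's five passes on the character list
def repA (l : List Char) : List Char :=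
  rep1 'p' 'A' (rep1 'S' 's' (rep1 'M' 'i' (rep1 'I' 'h' (rep1 'H' 'H' l))))

theorem scanB_code (b j : Char) (t : List Char) (h : jsCode? b = some j) :
    scanB ('%' :: b :: t) = j :: scanB t := by simp [scanB, h]

theorem scanB_nocode (b : Char) (t : List Char) (h : jsCode? b = none) :
    scanB ('%' :: b :: t) = '%' :: scanB (b :: t) := by simp [scanB, h]

theorem scanB_cons_ne (a : Char) (t : List Char) (h : a ≠ '%') :
    scanB (a :: t) = a :: scanB t := by
  cases t with
  | nil => simp [scanB]
  | cons c u => simp [scanB, h]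

theorem repA_eq_scanB : (l : List Char) → repA l = scanB l
  | [] => rfl
  | [a] => rfl
  | a :: b :: t => by
    by_cases ha : a = '%'
    · subst ha
      by_cases hH : b = 'H'
      · subst hH
        have hA : repA ('%' :: 'H' :: t) = 'H' :: repA t := by
          unfold repA
          rw [rep1_match,
            rep1_cons_ne 'I' 'h' 'H' _ (by decide),
            rep1_cons_ne 'M' 'i' 'H' _ (by decide),
            rep1_cons_ne 'S' 's' 'H' _ (by decide),
            rep1_cons_ne 'p' 'A' 'H' _ (by decide)]
        rw [hA, repA_eq_scanB t, scanB_code 'H' 'H' t (by decide)]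
      by_cases hI : b = 'I'
      · subst hI
        have hA : repA ('%' :: 'I' :: t) = 'h' :: repA t := by
          unfold repA
          rw [rep1_pct 'H' 'H' _ (by simp),
            rep1_cons_ne 'H' 'H' 'I' _ (by decide),
            rep1_match,
            rep1_cons_ne 'M' 'i' 'h' _ (by decide),
            rep1_cons_ne 'S' 's' 'h' _ (by decide),
            rep1_cons_ne 'p' 'A' 'h' _ (by decide)]
        rw [hA, repA_eq_scanB t, scanB_code 'I' 'h' t (by decide)]
      by_cases hM : b = 'M'
      · subst hM
        have hA : repA ('%' :: 'M' :: t) = 'i' :: repA t := by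
          unfold repA
          rw [rep1_pct 'H' 'H' _ (by simp),
            rep1_cons_ne 'H' 'H' 'M' _ (by decide),
            rep1_pct 'I' 'h' _ (by simp),
            rep1_cons_ne 'I' 'h' 'M' _ (by decide),
            rep1_match,
            rep1_cons_ne 'S' 's' 'i' _ (by decide),
            rep1_cons_ne 'p' 'A' 'i' _ (by decide)]
        rw [hA, repA_eq_scanB t, scanB_code 'M' 'i' t (by decide)]
      by_cases hS : b = 'S'
      · subst hS
        have hA : repA ('%' :: 'S' :: t) = 's' :: repA t := by
          unfold repA
          rw [rep1_pct 'H' 'H' _ (by simp),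
            rep1_cons_ne 'H' 'H' 'S' _ (by decide),
            rep1_pct 'I' 'h' _ (by simp),
            rep1_cons_ne 'I' 'h' 'S' _ (by decide),
            rep1_pct 'M' 'i' _ (by simp),
            rep1_cons_ne 'M' 'i' 'S' _ (by decide),
            rep1_match,
            rep1_cons_ne 'p' 'A' 's' _ (by decide)]
        rw [hA, repA_eq_scanB t, scanB_code 'S' 's' t (by decide)]
      by_cases hp : b = 'p'
      · subst hp
        have hA : repA ('%' :: 'p' :: t) = 'A' :: repA t := by
          unfold repA
          rw [rep1_pct 'H' 'H' _ (by simp),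
            rep1_cons_ne 'H' 'H' 'p' _ (by decide),
            rep1_pct 'I' 'h' _ (by simp),
            rep1_cons_ne 'I' 'h' 'p' _ (by decide),
            rep1_pct 'M' 'i' _ (by simp),
            rep1_cons_ne 'M' 'i' 'p' _ (by decide),
            rep1_pct 'S' 's' _ (by simp),
            rep1_cons_ne 'S' 's' 'p' _ (by decide),
            rep1_match]
        rw [hA, repA_eq_scanB t, scanB_code 'p' 'A' t (by decide)]
      by_cases hpct : b = '%'
      · -- '%%': every pass keeps the first '%' (no pattern starts with a non-'%' second char)
        subst hpct
        have h1 : rep1 'H' 'H' ('%' :: '%' :: t) = '%' :: rep1 'H' 'H' ('%' :: t) :=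
          rep1_pct 'H' 'H' _ (by simp)
        have hW1 := rep1_head 'H' 'H' ('%' :: t)
        have h2 : rep1 'I' 'h' ('%' :: rep1 'H' 'H' ('%' :: t)) =
            '%' :: rep1 'I' 'h' (rep1 'H' 'H' ('%' :: t)) := by
          apply rep1_pct
          rcases hW1 with h | h <;> simp [h]
        have hW2 := rep1_head 'I' 'h' (rep1 'H' 'H' ('%' :: t))
        have h3 : rep1 'M' 'i' ('%' :: rep1 'I' 'h' (rep1 'H' 'H' ('%' :: t))) =
            '%' :: rep1 'M' 'i' (rep1 'I' 'h' (rep1 'H' 'H' ('%' :: t))) := by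
          apply rep1_pct
          rcases hW2 with h | h
          · rw [h]; rcases hW1 with h' | h' <;> simp [h']
          · simp [h]
        have hW3 := rep1_head 'M' 'i' (rep1 'I' 'h' (rep1 'H' 'H' ('%' :: t)))
        have h4 : rep1 'S' 's' ('%' :: rep1 'M' 'i' (rep1 'I' 'h' (rep1 'H' 'H' ('%' :: t)))) =
            '%' :: rep1 'S' 's' (rep1 'M' 'i' (rep1 'I' 'h' (rep1 'H' 'H' ('%' :: t)))) := by
          apply rep1_pct
          rcases hW3 with h | h
          · rw [h]
            rcases hW2 with h' | h'
            · rw [h']; rcases hW1 with h'' | h'' <;> simp [h'']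
            · simp [h']
          · simp [h]
        have hW4 := rep1_head 'S' 's' (rep1 'M' 'i' (rep1 'I' 'h' (rep1 'H' 'H' ('%' :: t))))
        have h5 : rep1 'p' 'A' ('%' :: rep1 'S' 's' (rep1 'M' 'i' (rep1 'I' 'h' (rep1 'H' 'H' ('%' :: t))))) =
            '%' :: rep1 'p' 'A' (rep1 'S' 's' (rep1 'M' 'i' (rep1 'I' 'h' (rep1 'H' 'H' ('%' :: t))))) := by
          apply rep1_pct
          rcases hW4 with h | h
          · rw [h]
            rcases hW3 with h' | h'
            · rw [h']
              rcases hW2 with h'' | h''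
              · rw [h'']; rcases hW1 with h''' | h''' <;> simp [h''']
              · simp [h'']
            · simp [h']
          · simp [h]
        have hA : repA ('%' :: '%' :: t) = '%' :: repA ('%' :: t) := by
          unfold repA; rw [h1, h2, h3, h4, h5]
        rw [hA, repA_eq_scanB ('%' :: t), scanB_nocode '%' t (by decide)]
      · -- '%' followed by an unknown character: every pass keeps both characters
        have hA : repA ('%' :: b :: t) = '%' :: b :: repA t := by
          unfold repA
          rw [rep1_pct 'H' 'H' (b :: t) (by simpa using hH),
            rep1_cons_ne 'H' 'H' b t hpct,
            rep1_pct 'I' 'h' _ (by simpa using hI),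
            rep1_cons_ne 'I' 'h' b _ hpct,
            rep1_pct 'M' 'i' _ (by simpa using hM),
            rep1_cons_ne 'M' 'i' b _ hpct,
            rep1_pct 'S' 's' _ (by simpa using hS),
            rep1_cons_ne 'S' 's' b _ hpct,
            rep1_pct 'p' 'A' _ (by simpa using hp),
            rep1_cons_ne 'p' 'A' b _ hpct]
        have hnone : jsCode? b = none := by
          rw [jsCode?, PySem.Dict.get?_eq_none_iff_not_mem_keys]
          rw [show (PySem.Dict.ofList
              [('H', 'H'), ('I', 'h'), ('M', 'i'), ('S', 's'), ('p', 'A')]).keys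
              = ['H', 'I', 'M', 'S', 'p'] from rfl]
          simp [hH, hI, hM, hS, hp]
        rw [hA, repA_eq_scanB t, scanB_nocode b t hnone, scanB_cons_ne b t hpct]
    · -- head is not '%': every pass keeps it
      have hA : repA (a :: b :: t) = a :: repA (b :: t) := by
        unfold repA
        rw [rep1_cons_ne 'H' 'H' a _ ha,
          rep1_cons_ne 'I' 'h' a _ ha,
          rep1_cons_ne 'M' 'i' a _ ha,
          rep1_cons_ne 'S' 's' a _ ha,
          rep1_cons_ne 'p' 'A' a _ ha]
      rw [hA, repA_eq_scanB (b :: t), scanB_cons_ne a (b :: t) ha]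
termination_by l => l.length

theorem portA_toList (format : String) :
    (time_format_for_javascript_py format).toList = repA format.toList := by
  unfold time_format_for_javascript_py repA
  simp only [PySem.Str.toList_replace]
  rw [show ("%H" : String).toList = ['%', 'H'] from rfl,
    show ("H" : String).toList = ['H'] from rfl,
    show ("%I" : String).toList = ['%', 'I'] from rfl,
    show ("h" : String).toList = ['h'] from rfl,
    show ("%M" : String).toList = ['%', 'M'] from rfl,
    show ("i" : String).toList = ['i'] from rfl,
    show ("%S" : String).toList = ['%', 'S'] from rfl,
    show ("s" : String).toList = ['s'] from rfl,
    show ("%p" : String).toList = ['%', 'p'] from rfl,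
    show ("A" : String).toList = ['A'] from rfl]
  rw [replace_eq_rep1, replace_eq_rep1, replace_eq_rep1, replace_eq_rep1, replace_eq_rep1]

-- ===== VERDICT (by name: the statement is the Claim_ definition above) =====
theorem time_format_for_javascript_py_spec : Claim_equal_time_format_for_javascript_py := by
  intro format _
  unfold Spec_time_format_for_javascript_py time_format_for_javascript_py_alt
  have h : (time_format_for_javascript_py format).toList = scanB format.toList := by
    rw [portA_toList, repA_eq_scanB]
  rw [← h]
  simp
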